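-- pv_equiv track=rewrite | github.com/lewiswigmore/builder-agent | tools/vuln/hash_cracker.py | generate_bruteforce_candidates
-- ===== SOURCE A (Python) =====
-- from typing import Optional, Tuple, Iterable
--
-- def generate_bruteforce_candidates(charset: str, min_length: int, max_length: int,
--                                    start_length: Optional[int] = None, start_position: int = 0) -> Iterable[Tuple[str, int, int]]:
--     """
--     Generate brute force candidates.
--     Yields tuples: (candidate, current_length, position_within_length)
--     start_length: the length to start from
--     start_position: index within that length (0-based)
--     """
--     chars = charset
--     base = len(chars)
--     if base <= 0:
--         return
--     for length in range(min_length, max_length + 1):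
--         if start_length is not None and length < start_length:
--             continue
--         # Determine starting index for this length
--         pos_start = start_position if (start_length is not None and length == start_length) else 0
--         max_pos = pow(base, length)
--         for pos in range(pos_start, max_pos):
--             # Convert pos to base 'base' number with 'length' digits
--             n = pos
--             indices = [0] * length
--             for i in range(length - 1, -1, -1):
--                 indices[i] = n % base
--                 n //= base
--             candidate = "".join(chars[idx] for idx in indices)
--             yield candidate, length, pos
-- ===== SOURCE B (Python) =====
-- def generate_bruteforce_candidates(charset, min_length, max_length,
--                                    start_length=None, start_position=0):
--     """Incremental odometer: convert the starting position to digits once per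
--     length, then carry-increment the digit array between candidates instead of
--     re-doing the full base conversion for every position."""
--     base = len(charset)
--     if base <= 0:
--         return
--     first = min_length if start_length is None else max(min_length, start_length)
--     for length in range(first, max_length + 1):
--         pos = start_position if (start_length is not None and length == start_length) else 0
--         # digits of pos, least-significant first (Python %/// make this pos mod base**length)
--         digits = []
--         n = pos
--         for _ in range(length):
--             digits.append(n % base)
--             n //= base
--         total = base ** length
--         while pos < total:
--             yield ''.join(charset[d] for d in reversed(digits)), length, pos
--             pos += 1
--             i = 0
--             while i < length and digits[i] == base - 1:
--                 digits[i] = 0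
--                 i += 1
--             if i < length:
--                 digits[i] += 1
-- ===== Notes on version B (the rewrite author's own statement) =====
-- stated objective: alternative
-- what changed: Instead of recomputing the full base-'length' digit conversion of every position, B converts only the starting position once per length and then advances a least-significant-first digit array with an odometer carry-increment between candidates, folding the start_length skip into the loop's start; the per-candidate string join dominates both, so the overall cost is the same.
import Mathlib
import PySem

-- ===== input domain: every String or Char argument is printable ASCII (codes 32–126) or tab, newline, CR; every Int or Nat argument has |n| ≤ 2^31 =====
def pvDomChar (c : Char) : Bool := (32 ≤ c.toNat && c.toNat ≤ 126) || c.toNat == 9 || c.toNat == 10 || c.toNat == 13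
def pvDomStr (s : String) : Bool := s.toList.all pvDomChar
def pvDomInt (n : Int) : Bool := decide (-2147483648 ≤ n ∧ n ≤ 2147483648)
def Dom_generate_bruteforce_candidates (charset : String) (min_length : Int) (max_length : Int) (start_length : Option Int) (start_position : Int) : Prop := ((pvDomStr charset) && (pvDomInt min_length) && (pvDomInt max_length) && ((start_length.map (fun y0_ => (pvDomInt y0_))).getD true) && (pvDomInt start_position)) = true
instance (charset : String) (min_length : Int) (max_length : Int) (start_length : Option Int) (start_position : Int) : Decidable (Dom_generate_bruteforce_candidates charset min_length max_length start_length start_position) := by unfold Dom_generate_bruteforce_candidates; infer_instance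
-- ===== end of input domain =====

-- B replaces A's per-position full base conversion by an incremental odometer over a digit
-- array (carry-increment between candidates); a genuinely different enumeration mechanism of
-- the same cost (the per-candidate string join dominates both).
-- Both ports list the generator's yields; the equivalence is about that list of yields.

-- ===== PORT A =====
-- inner digit loop of A: 'for i in range(length-1, -1, -1): indices[i] = n % base; n //= base'
-- filling indices from the right; this recursion on the remaining count builds the same list.
def pvFillIndicesA (base : Int) : Nat → Int → List Int
  | 0, _ => []
  | k+1, n => pvFillIndicesA base k (PySem.Int.floordiv n base) ++ [PySem.Int.mod n base]

-- '"".join(chars[idx] for idx in indices)'; idx is always a valid index (0 ≤ idx < base)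
-- when base > 0, so the .getD default is never used.
def pvCandA (chars : String) (indices : List Int) : String :=
  String.mk (indices.map (fun idx => (PySem.Str.pyGet? chars idx).getD ' '))

def generate_bruteforce_candidates (charset : String) (min_length : Int) (max_length : Int) (start_length : Option Int) (start_position : Int) : List (String × Int × Int) :=
  let chars := charset
  let base : Int := PySem.Str.len chars
  if base ≤ 0 then []
  else
    (PySem.List.pyRange min_length (max_length + 1) 1).foldl (fun acc length =>
      -- 'if start_length is not None and length < start_length: continue'
      if (match start_length with | some sl => decide (length < sl) | none => false) then acc
      else
        let pos_start : Int :=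
          match start_length with
          | some sl => if length = sl then start_position else 0
          | none => 0
        let max_pos : Int := base ^ length.toNat   -- pow(base, length); length ≥ 0 on Pre_
        (PySem.List.pyRange pos_start max_pos 1).foldl (fun acc2 pos =>
          acc2 ++ [(pvCandA chars (pvFillIndicesA base length.toNat pos), length, pos)]) acc) []

-- ===== PORT B =====
-- initial digits of pos, least-significant first ('digits.append(n % base); n //= base')
def pvDigitsB (base : Int) : Nat → Int → List Int
  | 0, _ => []
  | k+1, n => PySem.Int.mod n base :: pvDigitsB base k (PySem.Int.floordiv n base)

-- the odometer carry-increment (the inner 'while i < length and digits[i] == base - 1' loop)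
def pvIncrB (base : Int) : List Int → List Int
  | [] => []
  | d :: ds => if d = base - 1 then 0 :: pvIncrB base ds else (d + 1) :: ds

-- ''.join(charset[d] for d in reversed(digits))
def pvCandB (chars : String) (digits : List Int) : String :=
  String.mk (digits.reverse.map (fun d => (PySem.Str.pyGet? chars d).getD ' '))

-- 'while pos < total: yield …; pos += 1; <carry-increment>'; fuel = number of remaining positions
def pvLoopB (chars : String) (base length : Int) : Nat → Int → List Int → List (String × Int × Int)
  | 0, _, _ => []
  | f+1, pos, digits =>
      (pvCandB chars digits, length, pos) :: pvLoopB chars base length f (pos + 1) (pvIncrB base digits)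

def generate_bruteforce_candidates_alt (charset : String) (min_length : Int) (max_length : Int) (start_length : Option Int) (start_position : Int) : List (String × Int × Int) :=
  let base : Int := PySem.Str.len charset
  if base ≤ 0 then []
  else
    let first : Int := match start_length with | some sl => max min_length sl | none => min_length
    (PySem.List.pyRange first (max_length + 1) 1).foldl (fun acc length =>
      let pos : Int :=
        match start_length with
        | some sl => if length = sl then start_position else 0
        | none => 0
      let total : Int := base ^ length.toNat
      acc ++ pvLoopB charset base length (total - pos).toNat pos (pvDigitsB base length.toNat pos)) []

-- ===== PRECONDITION & SPEC =====
-- Pre_ excludes exactly the inputs on which A raises TypeError: when the first length actually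
-- processed (max of min_length and start_length, if any) is negative, pow(base, length) is a
-- float and range() rejects it. Everywhere A returns, Pre_ holds.
def Pre_generate_bruteforce_candidates (charset : String) (min_length : Int) (max_length : Int) (start_length : Option Int) (start_position : Int) : Prop :=
  PySem.Str.len charset ≤ 0 ∨ max_length < min_length ∨
    max_length < max min_length (start_length.getD min_length) ∨
    0 ≤ max min_length (start_length.getD min_length)
instance (charset : String) (min_length : Int) (max_length : Int) (start_length : Option Int) (start_position : Int) : Decidable (Pre_generate_bruteforce_candidates charset min_length max_length start_length start_position) := by unfold Pre_generate_bruteforce_candidates; infer_instance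

def pvWitness_generate_bruteforce_candidates : String × Int × Int × Option Int × Int := ("ab", 1, 2, some 2, 1)

def Spec_generate_bruteforce_candidates (charset : String) (min_length : Int) (max_length : Int) (start_length : Option Int) (start_position : Int) (out : List (String × Int × Int)) : Prop := out = generate_bruteforce_candidates_alt charset min_length max_length start_length start_position
instance (charset : String) (min_length : Int) (max_length : Int) (start_length : Option Int) (start_position : Int) (out : List (String × Int × Int)) : Decidable (Spec_generate_bruteforce_candidates charset min_length max_length start_length start_position out) := by unfold Spec_generate_bruteforce_candidates; infer_instance

-- ===== CLAIM (what is proved, stated in full; the proofs are below) =====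
def Claim_equal_generate_bruteforce_candidates : Prop := ∀ (charset : String) (min_length : Int) (max_length : Int) (start_length : Option Int) (start_position : Int), Dom_generate_bruteforce_candidates charset min_length max_length start_length start_position → Pre_generate_bruteforce_candidates charset min_length max_length start_length start_position → Spec_generate_bruteforce_candidates charset min_length max_length start_length start_position (generate_bruteforce_candidates charset min_length max_length start_length start_position)

-- ===== LEMMAS AND PROOFS =====

-- arithmetic: incrementing n steps the base-b digit string exactly like the odometer carry
theorem pv_emod_succ_eq (b n : Int) (hb : 0 < b) (h : n % b = b - 1) :
    (n + 1) % b = 0 ∧ (n + 1) / b = n / b + 1 := by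
  have key : b * (n / b) + n % b = n := Int.ediv_add_emod n b
  have hn1 : n + 1 = b * (n / b + 1) := by rw [h] at key; linarith
  constructor
  · rw [hn1]; exact Int.mul_emod_right b _
  · rw [hn1]; exact Int.mul_ediv_cancel_left _ (ne_of_gt hb)

theorem pv_emod_succ_ne (b n : Int) (hb : 0 < b) (h : n % b ≠ b - 1) :
    (n + 1) % b = n % b + 1 ∧ (n + 1) / b = n / b := by
  have key : b * (n / b) + n % b = n := Int.ediv_add_emod n b
  have h0 : 0 ≤ n % b := Int.emod_nonneg n (ne_of_gt hb)
  have h1 : n % b < b := Int.emod_lt_of_pos n hb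
  have hlt : n % b + 1 < b := by omega
  have hn1 : n + 1 = (n % b + 1) + b * (n / b) := by linarith
  constructor
  · rw [hn1, Int.add_mul_emod_self_left, Int.emod_eq_of_lt (by omega) hlt]
  · rw [hn1, Int.add_mul_ediv_left _ _ (ne_of_gt hb),
        Int.ediv_eq_zero_of_lt (by omega) hlt, zero_add]

theorem pvDigitsB_succ (base : Int) (hb : 0 < base) :
    ∀ (k : Nat) (n : Int), pvDigitsB base k (n + 1) = pvIncrB base (pvDigitsB base k n) := by
  intro k
  induction k with
  | zero => intro n; rfl
  | succ k ih =>
      intro n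
      simp only [pvDigitsB, pvIncrB, PySem.Int.mod_eq_emod_of_pos hb,
        PySem.Int.floordiv_eq_ediv_of_pos hb]
      by_cases h : n % base = base - 1
      · obtain ⟨he, hd⟩ := pv_emod_succ_eq base n hb h
        rw [if_pos h, he, hd, ih]
      · obtain ⟨he, hd⟩ := pv_emod_succ_ne base n hb h
        rw [if_neg h, he, hd]

theorem pvFillIndicesA_eq_rev (base : Int) :
    ∀ (k : Nat) (n : Int), pvFillIndicesA base k n = (pvDigitsB base k n).reverse := by
  intro k
  induction k with
  | zero => intro n; rfl
  | succ k ih => intro n; simp [pvFillIndicesA, pvDigitsB, ih]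

theorem pvCand_eq (chars : String) (base : Int) (k : Nat) (n : Int) :
    pvCandA chars (pvFillIndicesA base k n) = pvCandB chars (pvDigitsB base k n) := by
  simp [pvCandA, pvCandB, pvFillIndicesA_eq_rev]

theorem pvLoopB_eq_map (chars : String) (base length : Int) (hb : 0 < base) :
    ∀ (f : Nat) (pos : Int),
      pvLoopB chars base length f pos (pvDigitsB base length.toNat pos)
        = (PySem.List.pyRange pos (pos + (f : Int)) 1).map
            (fun p => (pvCandA chars (pvFillIndicesA base length.toNat p), length, p)) := by
  intro f
  induction f with
  | zero =>
      intro pos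
      simp [pvLoopB, PySem.List.pyRange_one_eq_nil (le_refl pos)]
  | succ f ih =>
      intro pos
      rw [PySem.List.pyRange_one_cons (by push_cast; omega)]
      have harg : pos + ((f : Int) + 1) = (pos + 1) + (f : Int) := by ring
      push_cast
      rw [harg, List.map_cons]
      simp only [pvLoopB]
      rw [← pvDigitsB_succ base hb, ih (pos + 1), pvCand_eq]

-- B's per-length block equals the map over A's inner range
theorem pvBody_eq (chars : String) (base length p : Int) (hb : 0 < base) :
    pvLoopB chars base length (base ^ length.toNat - p).toNat p (pvDigitsB base length.toNat p)
      = (PySem.List.pyRange p (base ^ length.toNat) 1).map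
          (fun pos => (pvCandA chars (pvFillIndicesA base length.toNat pos), length, pos)) := by
  set total := base ^ length.toNat with htot
  by_cases hpt : p ≤ total
  · rw [pvLoopB_eq_map chars base length hb,
        show p + (((total - p).toNat : Nat) : Int) = total by omega]
  · have h0 : (total - p).toNat = 0 := by omega
    rw [h0, PySem.List.pyRange_one_eq_nil (by omega)]
    rfl

theorem pv_foldl_ext {α β : Type} {f g : α → β → α} (h : ∀ acc x, f acc x = g acc x) :
    ∀ (l : List β) (acc : α), l.foldl f acc = l.foldl g acc := by
  intro l
  induction l with
  | nil => intro acc; rfl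
  | cons x xs ih => intro acc; rw [List.foldl_cons, List.foldl_cons, h, ih]

-- folding with a 'continue when x < s' guard = folding over the range started at max a s
theorem pv_foldl_skip {α : Type} (g : α → Int → α) (s b : Int) :
    ∀ (n : Nat) (a : Int) (acc : α), (b - a).toNat = n →
      (PySem.List.pyRange a b 1).foldl (fun acc x => if x < s then acc else g acc x) acc
        = (PySem.List.pyRange (max a s) b 1).foldl g acc := by
  intro n
  induction n with
  | zero =>
      intro a acc hn
      rw [PySem.List.pyRange_one_eq_nil (show b ≤ a by omega),
        PySem.List.pyRange_one_eq_nil (show b ≤ max a s by omega)]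
      rfl
  | succ n ih =>
      intro a acc hn
      rw [PySem.List.pyRange_one_cons (by omega), List.foldl_cons]
      by_cases hlt : a < s
      · rw [if_pos hlt, ih (a + 1) acc (by omega)]
        congr 2
        omega
      · rw [if_neg hlt, ih (a + 1) (g acc a) (by omega)]
        have h1 : max a s = a := by omega
        have h2 : max (a + 1) s = a + 1 := by omega
        rw [h1, h2, PySem.List.pyRange_one_cons (show a < b by omega), List.foldl_cons]

-- ===== VERDICT (by name: the statement is the Claim_ definition above) =====
theorem generate_bruteforce_candidates_spec : Claim_equal_generate_bruteforce_candidates := by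
  intro charset min_length max_length start_length start_position _ _
  unfold Spec_generate_bruteforce_candidates
  unfold generate_bruteforce_candidates generate_bruteforce_candidates_alt
  by_cases hb : PySem.Str.len charset ≤ 0
  · rw [if_pos hb, if_pos hb]
  · rw [if_neg hb, if_neg hb]
    have hbpos : 0 < PySem.Str.len charset := by omega
    cases start_length with
    | none =>
        dsimp only
        apply pv_foldl_ext
        intro acc length
        rw [PySem.List.foldl_append_singleton_eq_map, pvBody_eq _ _ _ _ hbpos]
        simp
    | some sl =>
        dsimp only
        simp only [decide_eq_true_eq]
        rw [pv_foldl_skip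
          (fun acc length =>
            (PySem.List.pyRange (if length = sl then start_position else 0)
                (PySem.Str.len charset ^ length.toNat) 1).foldl (fun acc2 pos =>
              acc2 ++ [(pvCandA charset (pvFillIndicesA (PySem.Str.len charset) length.toNat pos),
                length, pos)]) acc)
          sl (max_length + 1) (max_length + 1 - min_length).toNat min_length [] rfl]
        apply pv_foldl_ext
        intro acc length
        rw [PySem.List.foldl_append_singleton_eq_map, pvBody_eq _ _ _ _ hbpos]
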